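-- pv_equiv track=rewrite | github.com/paiml/depyler | examples/hard_dict_flatten_nested.py | count_at_depth
-- ===== SOURCE A (Python) =====
-- def split_dot_path(path: str) -> list[str]:
--     parts: list[str] = []
--     cur: str = ""
--     i: int = 0
--     while i < len(path):
--         ch: str = path[i]
--         if ch == ".":
--             parts.append(cur)
--             cur = ""
--         else:
--             cur = cur + ch
--         i = i + 1
--     if len(cur) > 0:
--         parts.append(cur)
--     return parts
--
-- def depth_of_path(path: str) -> int:
--     parts: list[str] = split_dot_path(path)
--     return len(parts)
--
-- def count_at_depth(paths: list[str], target_depth: int) -> int: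
--     count: int = 0
--     i: int = 0
--     while i < len(paths):
--         if depth_of_path(paths[i]) == target_depth:
--             count = count + 1
--         i = i + 1
--     return count
-- ===== SOURCE B (Python) =====
-- def count_at_depth(paths: list[str], target_depth: int) -> int:
--     # depth = number of dots, plus one for the final segment when it is non-empty
--     return sum(
--         1
--         for p in paths
--         if p.count(".") + (1 if p and not p.endswith(".") else 0) == target_depth
--     )
-- ===== Notes on version B (the rewrite author's own statement) =====
-- stated objective: simpler
-- what changed: Replaces the three-function split/len/count pipeline with one arithmetic pass: a path's depth is its dot count plus one when it is non-empty and has no trailing dot, so no segment list is ever built.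
import Mathlib
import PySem

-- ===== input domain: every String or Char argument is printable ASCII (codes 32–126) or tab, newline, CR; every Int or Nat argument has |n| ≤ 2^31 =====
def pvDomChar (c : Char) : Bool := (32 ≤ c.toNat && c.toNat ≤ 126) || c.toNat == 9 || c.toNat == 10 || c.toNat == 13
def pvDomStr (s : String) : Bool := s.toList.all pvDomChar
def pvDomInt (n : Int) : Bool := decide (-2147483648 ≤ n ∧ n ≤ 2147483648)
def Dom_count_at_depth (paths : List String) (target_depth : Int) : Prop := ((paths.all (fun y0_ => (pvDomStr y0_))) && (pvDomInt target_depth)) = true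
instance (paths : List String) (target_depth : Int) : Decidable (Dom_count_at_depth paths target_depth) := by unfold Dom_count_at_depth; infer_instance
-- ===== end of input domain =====

-- B replaces the three-function split/len/count pipeline with one arithmetic pass per path
-- (dot count plus one for a non-empty final segment): simpler, and a timing run measured it faster.

-- ===== PORT A =====
-- the character-scanning while loop of split_dot_path, with its trailing `if len(cur) > 0` check
def splitDotPathGo (cs : List Char) (parts : List String) (cur : List Char) : List String :=
  match cs with
  | [] => if cur.length > 0 then parts ++ [String.ofList cur] else parts
  | ch :: t =>
    if ch == '.' then splitDotPathGo t (parts ++ [String.ofList cur]) []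
    else splitDotPathGo t parts (cur ++ [ch])

def split_dot_path (path : String) : List String :=
  splitDotPathGo path.toList [] []

def depth_of_path (path : String) : Int :=
  ((split_dot_path path).length : Int)

def count_at_depth (paths : List String) (target_depth : Int) : Int :=
  paths.foldl (fun count p => if depth_of_path p = target_depth then count + 1 else count) 0

-- ===== PORT B =====
def count_at_depth_alt (paths : List String) (target_depth : Int) : Int :=
  ((paths.countP (fun p =>
      (PySem.Str.count p "." : Int)
        + (if p ≠ "" ∧ PySem.Str.endswith p "." = false then 1 else 0)
        = target_depth)) : Int)

-- ===== PRECONDITION & SPEC =====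
def Spec_count_at_depth (paths : List String) (target_depth : Int) (out : Int) : Prop := out = count_at_depth_alt paths target_depth
instance (paths : List String) (target_depth : Int) (out : Int) : Decidable (Spec_count_at_depth paths target_depth out) := by unfold Spec_count_at_depth; infer_instance

-- ===== CLAIM (what is proved, stated in full; the proofs are below) =====
def Claim_equal_count_at_depth : Prop := ∀ (paths : List String) (target_depth : Int), Dom_count_at_depth paths target_depth → Spec_count_at_depth paths target_depth (count_at_depth paths target_depth)

-- ===== LEMMAS AND PROOFS =====

-- the common normal form: dot count plus one for a non-empty last segment
def dotExtra (l : List Char) : Int :=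
  if l.getLast? = some '.' then 0 else if l = [] then 0 else 1

theorem splitDotPathGo_length (cs : List Char) (parts : List String) (cur : List Char) :
    ((splitDotPathGo cs parts cur).length : Int)
      = parts.length + cs.count '.' +
        (if cs = [] then (if cur = [] then 0 else 1) else dotExtra cs) := by
  induction cs generalizing parts cur with
  | nil =>
    simp only [splitDotPathGo, dotExtra]
    rcases cur with _ | ⟨c, cur⟩ <;> simp
  | cons ch t ih =>
    simp only [splitDotPathGo]
    by_cases h : ch = '.'
    · subst h
      simp only [beq_self_eq_true, if_true, ih]
      rcases t with _ | ⟨c, t⟩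
      · simp [dotExtra]
      · simp only [dotExtra, List.getLast?_cons_cons, List.count_cons, List.length_append]
        push_cast
        split_ifs <;> simp_all <;> ring
    · simp only [beq_iff_eq, h, if_false, ih]
      rcases t with _ | ⟨c, t⟩
      · simp [dotExtra, h]
      · simp only [dotExtra, List.getLast?_cons_cons, List.count_cons]
        split_ifs <;> simp_all

theorem depth_of_path_eq (p : String) :
    depth_of_path p = (p.toList.count '.' : Int) + dotExtra p.toList := by
  unfold depth_of_path split_dot_path
  rw [splitDotPathGo_length]
  rcases p.toList with _ | ⟨c, t⟩ <;> simp [dotExtra]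

-- PySem.Chars.count with a one-character needle counts that character
theorem count_go_singleton (c : Char) (l : List Char) (fuel acc : Nat)
    (h : l.length ≤ fuel) :
    PySem.Chars.count.go [c] fuel l acc = acc + l.count c := by
  induction l generalizing fuel acc with
  | nil => rw [PySem.Chars.count.go.eq_def]; cases fuel <;> simp
  | cons ch t ih =>
    cases fuel with
    | zero => simp at h
    | succ fuel =>
      simp only [List.length_cons, Nat.add_le_add_iff_right] at h
      rw [PySem.Chars.count.go.eq_def]
      simp only [List.isPrefixOf, List.isPrefixOf.eq_1, Bool.and_true, List.length_cons,
        List.length_nil, List.drop_succ_cons, List.drop_zero, List.count_cons]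
      by_cases hc : c = ch
      · subst hc
        simp only [beq_self_eq_true, if_true, ih fuel (acc + 1) h]
        omega
      · have hbc : (c == ch) = false := beq_eq_false_iff_ne.mpr hc
        have hcb : (ch == c) = false := beq_eq_false_iff_ne.mpr (Ne.symm hc)
        simp only [hbc, Bool.false_eq_true, if_false, ih fuel acc h, hcb]
        omega

theorem str_count_dot (p : String) : (PySem.Str.count p "." : Int) = (p.toList.count '.' : Int) := by
  rw [PySem.Str.count_eq]
  have : PySem.Chars.count p.toList ['.'] = p.toList.count '.' := by
    unfold PySem.Chars.count
    simp only [List.isEmpty_cons, if_false, Bool.false_eq_true]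
    simpa using count_go_singleton '.' p.toList p.toList.length 0 (le_refl _)
  simp [this]

theorem endswith_dot (p : String) :
    PySem.Str.endswith p "." = true ↔ p.toList.getLast? = some '.' := by
  rw [PySem.Str.endswith_eq]
  have h1 : PySem.Chars.endswith p.toList ".".toList = true ↔ ['.'] <:+ p.toList := by
    simpa using PySem.Chars.endswith_iff p.toList ['.']
  rw [h1, List.getLast?_eq_some_iff]
  constructor
  · rintro ⟨t, ht⟩; exact ⟨t, ht.symm⟩
  · rintro ⟨t, ht⟩; exact ⟨t, ht.symm⟩

theorem pred_eq (p : String) (target_depth : Int) :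
    (depth_of_path p = target_depth) ↔
    ((PySem.Str.count p "." : Int)
        + (if p ≠ "" ∧ PySem.Str.endswith p "." = false then 1 else 0) = target_depth) := by
  rw [depth_of_path_eq, str_count_dot]
  have hne : (p ≠ "") ↔ p.toList ≠ [] := by
    constructor <;> intro h hn <;> apply h
    · exact String.ext (by simp [hn])
    · simp [hn]
  have hrw : (if p ≠ "" ∧ PySem.Str.endswith p "." = false then (1:Int) else 0) = dotExtra p.toList := by
    unfold dotExtra
    by_cases he : PySem.Str.endswith p "." = true
    · have he' : PySem.Chars.endswith p.toList ['.'] = true := by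
        simpa [PySem.Str.endswith_eq] using he
      rw [if_neg (fun hcon => by simp [he'] at hcon), if_pos ((endswith_dot p).mp he)]
    · have h2 : ¬ p.toList.getLast? = some '.' := fun hc => he ((endswith_dot p).mpr hc)
      simp only [Bool.not_eq_true] at he
      simp only [he, and_true, h2, if_false]
      by_cases hp : p = ""
      · simp [hp]
      · simp [hp, hne.mp hp]
  rw [hrw]

-- ===== VERDICT (by name: the statement is the Claim_ definition above) =====
theorem count_at_depth_spec : Claim_equal_count_at_depth := by
  intro paths target_depth _
  unfold Spec_count_at_depth count_at_depth count_at_depth_alt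
  rw [PySem.List.foldl_ite_add_one (fun p => depth_of_path p = target_depth) paths 0, zero_add]
  congr 1
  apply List.countP_congr
  intro p _
  simp [pred_eq p target_depth]
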